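-- pv_equiv track=rewrite | github.com/DrBugKiller/offer | bilibili-推荐查询.py | solution
-- ===== SOURCE A (Python) =====
-- def solution(from_id,to_id):
--     dict={}
--     for id in from_id:
--         if not id in dict:
--             dict[id]=1
--         else:
--             dict[id]+=1
--     id_count=list(dict.items())
--     id_count.sort(key=lambda a:a[1],reverse=True)
--     return id_count[0][0]
-- ===== SOURCE B (Python) =====
-- def solution(from_id, to_id):
--     return max(from_id, key=from_id.count)
-- ===== Notes on version B (the rewrite author's own statement) =====
-- stated objective: idiomatic
-- what changed: Replaces the hand-built frequency dict plus stable reverse sort with a single idiomatic max(from_id, key=from_id.count), whose first-maximal rule reproduces A's first-insertion tie-break; no table and no sort are built.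
import Mathlib
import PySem

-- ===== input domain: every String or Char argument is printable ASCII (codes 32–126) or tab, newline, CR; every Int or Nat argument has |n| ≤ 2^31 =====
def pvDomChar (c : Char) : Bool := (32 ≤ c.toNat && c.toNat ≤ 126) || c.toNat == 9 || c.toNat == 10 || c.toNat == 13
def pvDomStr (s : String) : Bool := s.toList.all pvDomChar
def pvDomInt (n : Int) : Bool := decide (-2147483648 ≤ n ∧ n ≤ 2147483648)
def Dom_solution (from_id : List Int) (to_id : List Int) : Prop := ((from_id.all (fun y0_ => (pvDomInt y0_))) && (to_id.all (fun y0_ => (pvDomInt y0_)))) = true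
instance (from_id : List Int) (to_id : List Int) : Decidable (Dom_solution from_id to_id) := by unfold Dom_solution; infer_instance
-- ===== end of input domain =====

-- B replaces A's frequency dict + stable reverse sort with one idiomatic
-- max(from_id, key=from_id.count) (first maximal element = A's first-insertion tie-break).

-- ===== PORT A =====
def solution (from_id : List Int) (to_id : List Int) : Int :=
  -- dict = {}; for id in from_id: if not id in dict: dict[id]=1 else: dict[id]+=1
  -- id_count = list(dict.items()); id_count.sort(key=lambda a: a[1], reverse=True)
  match PySem.List.pyGet?
      (PySem.List.sorted
        (from_id.foldl
          (fun d id =>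
            if d.contains id = false then d.insert id 1 else d.modify id 0 (· + 1))
          (PySem.Dict.empty : PySem.Dict Int Int)).items
        (fun a => a.2) true)
      0 with
  | some p => p.1
  | none => 0      -- unreachable under Pre_ (Python raises IndexError on empty from_id)

-- ===== PORT B =====
def solution_alt (from_id : List Int) (to_id : List Int) : Int :=
  match PySem.List.max? from_id (fun x => (PySem.List.count from_id x : Int)) with
  | some m => m
  | none => 0      -- unreachable under Pre_ (Python raises ValueError on empty from_id)

-- ===== PRECONDITION & SPEC =====
-- Pre_ excludes only the empty from_id, on which A raises IndexError (and B raises ValueError).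
def Pre_solution (from_id : List Int) (to_id : List Int) : Prop := from_id ≠ []
instance (from_id : List Int) (to_id : List Int) : Decidable (Pre_solution from_id to_id) := by unfold Pre_solution; infer_instance
def pvWitness_solution : List Int × List Int := ([1, 2, 1], [])

def Spec_solution (from_id : List Int) (to_id : List Int) (out : Int) : Prop := out = solution_alt from_id to_id
instance (from_id : List Int) (to_id : List Int) (out : Int) : Decidable (Spec_solution from_id to_id out) := by unfold Spec_solution; infer_instance

-- ===== CLAIM (what is proved, stated in full; the proofs are below) =====
def Claim_equal_solution : Prop := ∀ (from_id : List Int) (to_id : List Int), Dom_solution from_id to_id → Pre_solution from_id to_id → Spec_solution from_id to_id (solution from_id to_id)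

-- ===== LEMMAS AND PROOFS =====

-- head of one insertion step of the reverse stable sort
theorem head_insertBy_rev {α κ : Type} [LinearOrder κ] (key : α → κ) (x : α) (acc : List α) :
    (PySem.List.insertBy (fun a b => decide (key b < key a)) x acc).head? =
      match acc.head? with
      | none => some x
      | some h => if key h < key x then some x else some h := by
  cases acc with
  | nil => simp [PySem.List.insertBy]
  | cons y ys =>
      simp only [PySem.List.insertBy, List.head?_cons]
      split_ifs with h <;> simp_all

-- head of the insertBy fold is the strict-first running max
theorem head_foldl_insertBy_rev {α κ : Type} [LinearOrder κ] (key : α → κ) :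
    ∀ (xs acc : List α),
    (xs.foldl (fun acc x => PySem.List.insertBy (fun a b => decide (key b < key a)) x acc) acc).head? =
      xs.foldl
        (fun o x =>
          match o with
          | none => some x
          | some h => if key h < key x then some x else some h)
        acc.head? := by
  intro xs
  induction xs with
  | nil => intro acc; rfl
  | cons x t ih =>
      intro acc
      simp only [List.foldl_cons]
      rw [ih, head_insertBy_rev]

-- head of Python's stable reverse sort is max(xs, key) (first maximal element)
theorem head_sorted_rev_eq_max? {α κ : Type} [LinearOrder κ] (xs : List α) (key : α → κ) :
    (PySem.List.sorted xs key true).head? = PySem.List.max? xs key := by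
  rw [PySem.List.sorted_rev_eq_foldl_insertBy, head_foldl_insertBy_rev]
  rfl

-- A's counting loop is collections.Counter
theorem dict_loop_eq_counter (from_id : List Int) :
    from_id.foldl
      (fun d id =>
        if d.contains id = false then d.insert id 1 else d.modify id 0 (· + 1))
      (PySem.Dict.empty : PySem.Dict Int Int) = PySem.Dict.counter from_id := by
  rw [PySem.Dict.counter_eq_foldl]
  apply PySem.List.foldl_congr_mem
  intro d id _
  by_cases h : d.contains id = false
  · simp only [h, if_true, PySem.Dict.modify,
      PySem.Dict.getD_of_not_contains d (0 : Int) h]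
    norm_num
  · simp [h]

-- a fold over mapped elements tracks the fold over the originals through Option.map
theorem foldl_map_option {α β : Type} (f : α → β) (g : Option β → β → Option β)
    (h : Option α → α → Option α)
    (hcomm : ∀ (o : Option α) (x : α), g (o.map f) (f x) = (h o x).map f) :
    ∀ (s : List α) (o : Option α), (s.map f).foldl g (o.map f) = (s.foldl h o).map f := by
  intro s
  induction s with
  | nil => intro o; rfl
  | cons x t ih =>
      intro o
      simp only [List.map_cons, List.foldl_cons]
      rw [hcomm]
      exact ih (h o x)

-- one more element on the right is one more step of the running max
theorem max?_append_singleton {α κ : Type} [LinearOrder κ] (l : List α) (x : α) (key : α → κ) :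
    PySem.List.max? (l ++ [x]) key =
      match PySem.List.max? l key with
      | none => some x
      | some m => if key m < key x then some x else some m := by
  simp only [PySem.List.max?, List.foldl_append, List.foldl_cons, List.foldl_nil]
  rfl

-- max? over set(xs) equals max? over xs (duplicates never win the strict test)
theorem max?_ofList_eq (cnt : Int → Int) (xs : List Int) :
    PySem.List.max? (PySem.Set.ofList xs) cnt = PySem.List.max? xs cnt := by
  induction xs using List.reverseRecOn with
  | nil => rfl
  | append_singleton t x ih =>
      have hof : PySem.Set.ofList (t ++ [x]) = PySem.Set.add (PySem.Set.ofList t) x := by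
        simp [PySem.Set.ofList, List.foldl_append]
      rw [max?_append_singleton]
      by_cases hx : x ∈ t
      · have hthis : PySem.Set.ofList (t ++ [x]) = PySem.Set.ofList t := by
          rw [hof]; simp [PySem.Set.add, PySem.Set.mem_ofList, hx]
        rw [hthis, ih]
        obtain ⟨m, hm⟩ : ∃ m, PySem.List.max? t cnt = some m := by
          cases h : PySem.List.max? t cnt with
          | none => exact absurd ((PySem.List.max?_eq_none_iff t cnt).mp h) (by
              intro he; rw [he] at hx; cases hx)
          | some m => exact ⟨m, rfl⟩
        have hle : cnt x ≤ cnt m := PySem.List.max?_isMax hm x hx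
        rw [hm]
        simp [not_lt.mpr hle]
      · have hthis : PySem.Set.ofList (t ++ [x]) = PySem.Set.ofList t ++ [x] := by
          rw [hof]; simp [PySem.Set.add, PySem.Set.mem_ofList, hx]
        rw [hthis, max?_append_singleton, ih]

-- ===== VERDICT (by name: the statement is the Claim_ definition above) =====
theorem solution_spec : Claim_equal_solution := by
  intro from_id to_id _ hpre
  unfold Spec_solution solution solution_alt
  simp only [dict_loop_eq_counter]
  have hget : ∀ (l : List (Int × Int)), PySem.List.pyGet? l 0 = l.head? := by
    intro l; cases l <;> simp [PySem.List.pyGet?, PySem.List.pyIdx?]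
  rw [hget, head_sorted_rev_eq_max?, PySem.Dict.items_counter]
  have hcnt : (fun k : Int => (k, (List.count k from_id : Int))) =
      (fun k : Int => (k, (PySem.List.count from_id k : Int))) := by
    funext k; simp [PySem.List.count]
  rw [hcnt]
  have hmax : PySem.List.max?
        ((PySem.Set.ofList from_id).map (fun k => (k, (PySem.List.count from_id k : Int))))
        (fun a => a.2) =
      (PySem.List.max? (PySem.Set.ofList from_id)
        (fun x => (PySem.List.count from_id x : Int))).map
        (fun k => (k, (PySem.List.count from_id k : Int))) := by
    simp only [PySem.List.max?]
    refine foldl_map_option (fun k => (k, (PySem.List.count from_id k : Int))) _ _ ?_ _ none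
    intro o x
    cases o with
    | none => rfl
    | some m =>
        dsimp only [Option.map_some]
        split_ifs <;> simp_all
  rw [hmax, max?_ofList_eq]
  cases h : PySem.List.max? from_id (fun x => (PySem.List.count from_id x : Int)) with
  | none => exact absurd ((PySem.List.max?_eq_none_iff _ _).mp h) hpre
  | some m => rfl
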